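-- pv_equiv track=rewrite | github.com/LinithaP/Python-Assignments | Beginner/Level 2/Q10.py | stone_pile
-- ===== SOURCE A (Python) =====
-- def stone_pile(n):
--     if n % 2 == 0:
--         i = 2 #even
--     else:
--         i = 1
--
--     result = []
--     total= n
--     while total > 0:
--         result.append(i)
--         total -= i
--         i += 2
--
--     return result
-- ===== SOURCE B (Python) =====
-- def stone_pile(n):
--     # The pile is the first k terms of an arithmetic progression (step 2)
--     # starting at 1 (n odd) or 2 (n even), where k is the smallest count
--     # whose partial sum reaches n.  Find k by binary search instead of
--     # decrementing a running total term by term.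
--     if n <= 0:
--         return []
--     a = 2 if n % 2 == 0 else 1
--     # partial sum of j terms starting at a with step 2 is j*(j + a - 1)
--     lo, hi = 0, n
--     while lo < hi:
--         mid = (lo + hi) // 2
--         if mid * (mid + a - 1) >= n:
--             hi = mid
--         else:
--             lo = mid + 1
--     return list(range(a, a + 2 * lo, 2))
-- ===== Notes on version B (the rewrite author's own statement) =====
-- stated objective: faster
-- what changed: Replaces the running-total decrement loop (one iteration per stone) with a binary search for the smallest count k whose arithmetic-progression partial sum k*(k+a-1) reaches n, then emits the pile as a single range(a, a+2k, 2).
import Mathlib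
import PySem

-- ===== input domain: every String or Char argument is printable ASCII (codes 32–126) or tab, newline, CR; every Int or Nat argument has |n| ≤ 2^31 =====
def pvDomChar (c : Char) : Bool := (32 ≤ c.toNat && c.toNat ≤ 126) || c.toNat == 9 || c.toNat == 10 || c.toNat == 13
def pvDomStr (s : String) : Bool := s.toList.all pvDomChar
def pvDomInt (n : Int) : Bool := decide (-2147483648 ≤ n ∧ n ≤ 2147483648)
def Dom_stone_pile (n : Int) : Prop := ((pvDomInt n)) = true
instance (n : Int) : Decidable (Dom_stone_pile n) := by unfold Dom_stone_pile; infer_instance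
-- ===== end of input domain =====

-- B finds the number of stones by binary search on the partial-sum formula and emits the
-- pile as one arithmetic range, instead of A's term-by-term running-total decrement loop.


-- ===== PORT A =====
-- A's while loop; fuel = n.toNat + 1 bounds the iteration count (each step shrinks total by i ≥ 1)
def pyLoopA (fuel : Nat) (i total : Int) : List Int :=
  match fuel with
  | 0 => []
  | f + 1 => if total > 0 then i :: pyLoopA f (i + 2) (total - i) else []

def stone_pile (n : Int) : List Int :=
  if PySem.Int.mod n 2 = 0 then pyLoopA (n.toNat + 1) 2 n else pyLoopA (n.toNat + 1) 1 n

-- ===== PORT B =====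
-- B's while loop: binary search for smallest k with k*(k+a-1) ≥ n; fuel = n.toNat bounds it
-- (hi - lo strictly shrinks each iteration)
def pyBsearchB (fuel : Nat) (a n lo hi : Int) : Int :=
  match fuel with
  | 0 => lo
  | f + 1 =>
    if lo < hi then
      let mid := PySem.Int.floordiv (lo + hi) 2
      if mid * (mid + a - 1) ≥ n then pyBsearchB f a n lo mid
      else pyBsearchB f a n (mid + 1) hi
    else lo

def stone_pile_alt (n : Int) : List Int :=
  if n ≤ 0 then []
  else
    let a : Int := if PySem.Int.mod n 2 = 0 then 2 else 1
    let k := pyBsearchB n.toNat a n 0 n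
    PySem.List.pyRange a (a + 2 * k) 2

-- ===== PRECONDITION & SPEC =====
def Spec_stone_pile (n : Int) (out : List Int) : Prop := out = stone_pile_alt n
instance (n : Int) (out : List Int) : Decidable (Spec_stone_pile n out) := by unfold Spec_stone_pile; infer_instance

-- ===== CLAIM (what is proved, stated in full; the proofs are below) =====
def Claim_equal_stone_pile : Prop := ∀ (n : Int), Dom_stone_pile n → Spec_stone_pile n (stone_pile n)

-- ===== LEMMAS AND PROOFS =====

-- step-2 range: cons and nil
lemma pyRange_two_nil {a b : Int} (h : b ≤ a) : PySem.List.pyRange a b 2 = [] := by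
  rw [PySem.List.pyRange_of_pos a b (by norm_num)]
  have : ¬ a < b := by omega
  simp [this]

lemma pyRange_two_cons {a b : Int} (h : a < b) :
    PySem.List.pyRange a b 2 = a :: PySem.List.pyRange (a + 2) b 2 := by
  rw [PySem.List.pyRange_of_pos a b (by norm_num), PySem.List.pyRange_of_pos (a+2) b (by norm_num)]
  by_cases h2 : a + 2 < b
  · have hc : (if a < b then ((b - a + 2 - 1) / 2).toNat else 0)
        = (if a + 2 < b then ((b - (a + 2) + 2 - 1) / 2).toNat else 0) + 1 := by
      simp only [if_pos h, if_pos h2]; omega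
    rw [hc, List.range_succ_eq_map, List.map_cons, List.map_map]
    congr 1
    · push_cast; ring
    · refine List.map_congr_left (fun x _ => ?_)
      simp only [Function.comp_apply]
      push_cast; ring
  · have hc1 : (if a < b then ((b - a + 2 - 1) / 2).toNat else 0) = 1 := by
      simp only [if_pos h]; omega
    simp [hc1, if_neg h2, List.range_succ]

-- monotonicity of the partial-sum formula j ↦ j*(j+a-1) on 0 ≤ j, for a ≥ 1
lemma psum_mono {a j j' : Int} (ha : 1 ≤ a) (hj : 0 ≤ j) (h : j ≤ j') :
    j * (j + a - 1) ≤ j' * (j' + a - 1) := by nlinarith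

-- binary search returns the least k with k*(k+a-1) ≥ n
lemma bsearch_eq (a n k : Int) (ha : 1 ≤ a) (hk0 : 0 ≤ k) (hkP : n ≤ k * (k + a - 1))
    (hkmin : ∀ j : Int, 0 ≤ j → j < k → j * (j + a - 1) < n) :
    ∀ (fuel : Nat) (lo hi : Int), 0 ≤ lo → lo ≤ k → k ≤ hi → (hi - lo).toNat ≤ fuel →
      pyBsearchB fuel a n lo hi = k := by
  intro fuel
  induction fuel with
  | zero => intro lo hi _ h1 h2 h3; simp only [pyBsearchB]; omega
  | succ f ih =>
    intro lo hi hlo h1 h2 h3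
    simp only [pyBsearchB]
    by_cases hlh : lo < hi
    · rw [if_pos hlh]
      have hmid := PySem.Int.floordiv_two_mid_bounds (le_of_lt hlh)
      have hmid2 : PySem.Int.floordiv (lo + hi) 2 = (lo + hi) / 2 :=
        PySem.Int.floordiv_eq_ediv_of_pos (by norm_num)
      set mid := PySem.Int.floordiv (lo + hi) 2 with hm
      have hb : lo ≤ mid ∧ mid < hi := by constructor <;> omega
      by_cases hcmp : mid * (mid + a - 1) ≥ n
      · rw [if_pos hcmp]
        have hkm : k ≤ mid := by
          by_contra hc
          have := hkmin mid (by omega) (by omega)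
          omega
        exact ih lo mid hlo h1 hkm (by omega)
      · rw [if_neg hcmp]
        have hkm : mid < k := by
          by_contra hc
          have := psum_mono ha hk0 (show k ≤ mid by omega)
          omega
        exact ih (mid + 1) hi (by omega) (by omega) h2 (by omega)
    · rw [if_neg hlh]; omega

-- A's loop, run from the state after j iterations, produces the remaining range
lemma loopA_eq (a n k : Int) (_ha : 1 ≤ a) (hk0 : 0 ≤ k) (hkP : n ≤ k * (k + a - 1))
    (hkmin : ∀ j : Int, 0 ≤ j → j < k → j * (j + a - 1) < n) :
    ∀ (fuel : Nat) (j : Int), 0 ≤ j → j ≤ k → (k - j).toNat < fuel →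
      pyLoopA fuel (a + 2 * j) (n - j * (j + a - 1)) =
        PySem.List.pyRange (a + 2 * j) (a + 2 * k) 2 := by
  intro fuel
  induction fuel with
  | zero => intro j _ _ h3; omega
  | succ f ih =>
    intro j hj0 hjk hfuel
    simp only [pyLoopA]
    by_cases hpos : n - j * (j + a - 1) > 0
    · rw [if_pos hpos]
      have hjlt : j < k := by
        by_contra hc
        have : j = k := by omega
        subst this; omega
      have harg1 : a + 2 * j + 2 = a + 2 * (j + 1) := by ring
      have harg2 : n - j * (j + a - 1) - (a + 2 * j) = n - (j + 1) * ((j + 1) + a - 1) := by ring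
      rw [harg1, harg2, ih (j + 1) (by omega) (by omega) (by omega)]
      conv_rhs => rw [pyRange_two_cons (show a + 2 * j < a + 2 * k by omega)]
      congr 2
      ring
    · rw [if_neg hpos]
      have hjek : j = k := by
        by_contra hc
        have := hkmin j hj0 (by omega)
        omega
      subst hjek
      rw [pyRange_two_nil (by omega)]

-- existence of the least k with k*(k+a-1) ≥ n, and k ≤ n, for 1 ≤ a, 1 ≤ n
lemma exists_least_k (a n : Int) (ha : 1 ≤ a) (hn : 1 ≤ n) :
    ∃ k : Int, 0 ≤ k ∧ k ≤ n ∧ n ≤ k * (k + a - 1) ∧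
      ∀ j : Int, 0 ≤ j → j < k → j * (j + a - 1) < n := by
  have hex : ∃ m : Nat, n ≤ (m : Int) * ((m : Int) + a - 1) := by
    refine ⟨n.toNat, ?_⟩
    have h1 : (n.toNat : Int) = n := by omega
    rw [h1]; nlinarith
  classical
  let m := Nat.find hex
  have hmP : n ≤ (m : Int) * ((m : Int) + a - 1) := Nat.find_spec hex
  refine ⟨(m : Int), by positivity, ?_, hmP, ?_⟩
  · by_contra hc
    have hlt : n < (m : Int) := by omega
    have hmin := Nat.find_min hex (m := n.toNat) (by omega)
    have h1 : (n.toNat : Int) = n := by omega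
    rw [h1] at hmin
    have : n ≤ n * (n + a - 1) := by nlinarith
    omega
  · intro j hj0 hjm
    have hmin := Nat.find_min hex (m := j.toNat) (by omega)
    have h1 : (j.toNat : Int) = j := by omega
    rw [h1] at hmin
    omega

lemma branch_eq (a n : Int) (ha : 1 ≤ a) (hn : 0 < n) :
    pyLoopA (n.toNat + 1) a n = PySem.List.pyRange a (a + 2 * pyBsearchB n.toNat a n 0 n) 2 := by
  obtain ⟨k, hk0, hkn, hkP, hkmin⟩ := exists_least_k a n ha (by omega)
  rw [bsearch_eq a n k ha hk0 hkP hkmin n.toNat 0 n le_rfl hk0 hkn (by omega)]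
  have h0 := loopA_eq a n k ha hk0 hkP hkmin (n.toNat + 1) 0 le_rfl hk0 (by omega)
  simpa using h0

lemma main_eq (n : Int) : stone_pile n = stone_pile_alt n := by
  by_cases hn : n ≤ 0
  · have hfuel : n.toNat + 1 = 1 := by omega
    simp only [stone_pile, stone_pile_alt, if_pos hn, hfuel]
    have h1 : ∀ i : Int, pyLoopA 1 i n = [] := by
      intro i; simp only [pyLoopA]; rw [if_neg (by omega)]
    split_ifs <;> simp [h1]
  · simp only [stone_pile, stone_pile_alt, if_neg hn]
    by_cases hpar : PySem.Int.mod n 2 = 0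
    · simp only [if_pos hpar]
      exact branch_eq 2 n (by norm_num) (by omega)
    · simp only [if_neg hpar]
      exact branch_eq 1 n (by norm_num) (by omega)

-- ===== VERDICT (by name: the statement is the Claim_ definition above) =====
theorem stone_pile_spec : Claim_equal_stone_pile := by
  intro n _
  unfold Spec_stone_pile
  exact main_eq n
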